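-- pv_equiv track=rewrite | github.com/LumbaBalumba/aim_ml | 6/fix.py | titlecase_hyphenated
-- ===== SOURCE A (Python) =====
-- def titlecase_hyphenated(token: str) -> str:
--     if not token:
--         return token
--     parts = token.split("-")
--     out = []
--     for p in parts:
--         if not p:
--             out.append(p)
--         else:
--             out.append(p[:1].upper() + p[1:].lower())
--     return "-".join(out)
-- ===== SOURCE B (Python) =====
-- def titlecase_hyphenated(token: str) -> str:
--     out = []
--     at_start = True
--     for c in token:
--         if c == "-":
--             out.append("-")
--             at_start = True
--         elif at_start:
--             out.append(c.upper())
--             at_start = False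
--         else:
--             out.append(c.lower())
--     return "".join(out)
-- ===== Notes on version B (the rewrite author's own statement) =====
-- stated objective: alternative
-- what changed: Replaces split('-')/per-part slicing-and-case-mapping/join with a single stateful pass over the characters carrying an at_start flag.
import Mathlib
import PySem

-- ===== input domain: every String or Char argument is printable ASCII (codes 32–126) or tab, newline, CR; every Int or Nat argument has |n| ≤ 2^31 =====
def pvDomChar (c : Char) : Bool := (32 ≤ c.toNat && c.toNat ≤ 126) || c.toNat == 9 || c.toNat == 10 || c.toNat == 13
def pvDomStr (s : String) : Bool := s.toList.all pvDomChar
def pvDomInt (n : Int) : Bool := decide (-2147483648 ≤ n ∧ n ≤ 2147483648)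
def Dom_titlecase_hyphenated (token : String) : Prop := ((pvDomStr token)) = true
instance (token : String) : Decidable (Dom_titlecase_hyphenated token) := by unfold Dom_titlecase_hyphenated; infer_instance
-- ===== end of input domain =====

-- B replaces A's split('-') / per-part slice-and-case / join('-') by a single stateful
-- pass over the characters with an at_start flag (alternative decomposition, same cost).

-- ===== PORT A =====
-- per-part transform of A's loop body: p if p is empty, else p[:1].upper() + p[1:].lower()
def pvTf (p : List Char) : List Char :=
  if p = [] then p
  else PySem.Chars.upper (PySem.Chars.slice p none (some 1)) ++
       PySem.Chars.lower (PySem.Chars.slice p (some 1) none)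

def titlecase_hyphenated (token : String) : String :=
  if token = "" then token
  else String.ofList
    (PySem.Chars.join ['-'] ((PySem.Chars.splitOn token.toList ['-']).map pvTf))

-- ===== PORT B =====
-- the loop of Source B: out is the accumulated character list, atStart the flag
def pvLoopB (cs : List Char) (atStart : Bool) (out : List Char) : List Char :=
  match cs with
  | [] => out
  | c :: rest =>
    if c = '-' then pvLoopB rest true (out ++ ['-'])
    else if atStart then pvLoopB rest false (out ++ [PySem.Chars.upperChar c])
    else pvLoopB rest false (out ++ [PySem.Chars.lowerChar c])

def titlecase_hyphenated_alt (token : String) : String :=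
  String.ofList (pvLoopB token.toList true [])

-- ===== PRECONDITION & SPEC =====
def Spec_titlecase_hyphenated (token : String) (out : String) : Prop := out = titlecase_hyphenated_alt token
instance (token : String) (out : String) : Decidable (Spec_titlecase_hyphenated token out) := by unfold Spec_titlecase_hyphenated; infer_instance

-- ===== CLAIM (what is proved, stated in full; the proofs are below) =====
def Claim_equal_titlecase_hyphenated : Prop := ∀ (token : String), Dom_titlecase_hyphenated token → Spec_titlecase_hyphenated token (titlecase_hyphenated token)

-- ===== LEMMAS AND PROOFS =====

-- prepend to the head part: pvConsHead pre parts = (pre ++ head) :: tail (or [pre] on [])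
def pvConsHead (pre : List Char) : List (List Char) → List (List Char)
  | [] => [pre]
  | p :: ps => (pre ++ p) :: ps

-- structural characterization of splitOn on the single-char separator '-'
def pvSplit : List Char → List (List Char)
  | [] => [[]]
  | c :: cs => if c = '-' then [] :: pvSplit cs else pvConsHead [c] (pvSplit cs)

-- pure-recursion form of B's loop
def pvG (atStart : Bool) (cs : List Char) : List Char :=
  match cs with
  | [] => []
  | c :: rest =>
    if c = '-' then '-' :: pvG true rest
    else if atStart then PySem.Chars.upperChar c :: pvG false rest
    else PySem.Chars.lowerChar c :: pvG false rest

lemma pvConsHead_ne_nil (pre : List Char) (ps : List (List Char)) : pvConsHead pre ps ≠ [] := by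
  cases ps <;> simp [pvConsHead]

lemma pvSplit_ne_nil (cs : List Char) : pvSplit cs ≠ [] := by
  cases cs with
  | nil => simp [pvSplit]
  | cons c cs => by_cases hc : c = '-' <;> simp [pvSplit, hc, pvConsHead_ne_nil]

lemma pvConsHead_nil (ps : List (List Char)) (h : ps ≠ []) : pvConsHead [] ps = ps := by
  cases ps with
  | nil => exact absurd rfl h
  | cons p ps => simp [pvConsHead]

lemma pvConsHead_consHead (x y : List Char) (ps : List (List Char)) :
    pvConsHead x (pvConsHead y ps) = pvConsHead (x ++ y) ps := by
  cases ps <;> simp [pvConsHead]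

set_option maxHeartbeats 1000000 in
lemma pvGo_spec (fuel : Nat) (l cur : List Char) (acc : List (List Char))
    (h : l.length ≤ fuel) :
    PySem.Chars.splitOn.go ['-'] fuel l cur acc
      = acc.reverse ++ pvConsHead cur.reverse (pvSplit l) := by
  induction fuel generalizing l cur acc with
  | zero =>
      have hl : l = [] := List.length_eq_zero_iff.mp (Nat.le_zero.mp h)
      subst hl
      simp [PySem.Chars.splitOn.go, pvSplit, pvConsHead]
  | succ f ih =>
      cases l with
      | nil => simp [PySem.Chars.splitOn.go, pvSplit, pvConsHead]
      | cons c rest =>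
          rw [PySem.Chars.splitOn.go]
          by_cases hc : c = '-'
          · subst hc
            simp only [List.isPrefixOf, BEq.rfl, Bool.true_and, if_true,
              List.length_cons, List.length_nil, List.drop_succ_cons, List.drop_zero]
            rw [ih rest [] _ (by simpa using Nat.le_of_succ_le_succ h)]
            simp only [List.reverse_nil]
            rw [pvConsHead_nil _ (pvSplit_ne_nil rest)]
            simp [pvSplit, pvConsHead]
          · have hpf : ['-'].isPrefixOf (c :: rest) = false := by
              simp [List.isPrefixOf]; exact fun h => absurd h.symm hc
            rw [if_neg (by simp [hpf])]
            rw [ih rest (c :: cur) acc (by simpa using Nat.le_of_succ_le_succ h)]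
            simp only [List.reverse_cons]
            rw [show pvSplit (c :: rest) = pvConsHead [c] (pvSplit rest) from by
              simp [pvSplit, hc]]
            rw [pvConsHead_consHead]

lemma pvSplitOn_eq (cs : List Char) : PySem.Chars.splitOn cs ['-'] = pvSplit cs := by
  unfold PySem.Chars.splitOn
  rw [pvGo_spec _ _ _ _ (Nat.le_succ _)]
  simp [pvConsHead_nil _ (pvSplit_ne_nil cs)]

lemma pvLoopB_eq (cs : List Char) (st : Bool) (out : List Char) :
    pvLoopB cs st out = out ++ pvG st cs := by
  induction cs generalizing st out with
  | nil => simp [pvLoopB, pvG]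
  | cons c rest ih =>
      by_cases hc : c = '-'
      · simp [pvLoopB, pvG, hc, ih]
      · cases st <;> simp [pvLoopB, pvG, hc, ih]

lemma pvTf_cons (c : Char) (p : List Char) :
    pvTf (c :: p) = PySem.Chars.upperChar c :: PySem.Chars.lower p := by
  simp [pvTf, PySem.Chars.upper, PySem.Chars.lower, PySem.Chars.slice_eq_listSlice,
    PySem.List.slice_from_one, PySem.List.slice_to]

lemma pvJoin_cons_head (sep : List Char) (a : Char) (x : List Char) (l : List (List Char)) :
    PySem.Chars.join sep ((a :: x) :: l) = a :: PySem.Chars.join sep (x :: l) := by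
  cases l with
  | nil => simp [PySem.Chars.join_singleton]
  | cons q rest => simp [PySem.Chars.join_cons_cons]

-- main invariant: A's join-of-titled-parts equals B's stateful pass, in both flag states
lemma pvMain (cs : List Char) :
    PySem.Chars.join ['-'] ((pvSplit cs).map pvTf) = pvG true cs ∧
    (∀ p ps, pvSplit cs = p :: ps →
      PySem.Chars.join ['-'] (PySem.Chars.lower p :: ps.map pvTf) = pvG false cs) := by
  induction cs with
  | nil =>
      refine ⟨by simp [pvSplit, pvTf, pvG, PySem.Chars.join_singleton], ?_⟩
      intro p ps h
      simp only [pvSplit] at h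
      injection h with h1 h2
      subst h1; subst h2
      simp [pvG, PySem.Chars.lower, PySem.Chars.join_singleton]
  | cons c cs ih =>
      obtain ⟨p, ps, hps⟩ := List.exists_cons_of_ne_nil (pvSplit_ne_nil cs)
      by_cases hc : c = '-'
      · subst hc
        have key : PySem.Chars.join ['-'] (([] : List Char) :: (pvSplit cs).map pvTf)
            = '-' :: pvG true cs := by
          rw [hps, List.map_cons, PySem.Chars.join_cons_cons]
          simp only [List.nil_append, List.singleton_append]
          rw [← List.map_cons, ← hps, ih.1]
        constructor
        · simp only [pvSplit, reduceIte, List.map_cons]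
          rw [show pvTf [] = [] from by simp [pvTf]]
          rw [key]
          simp [pvG]
        · intro q qs hq
          simp only [pvSplit, reduceIte] at hq
          injection hq with h1 h2
          subst h1; subst h2
          rw [show PySem.Chars.lower [] = ([] : List Char) from rfl]
          rw [key]
          simp [pvG]
      · have hsp : pvSplit (c :: cs) = (c :: p) :: ps := by
          simp [pvSplit, hc, hps, pvConsHead]
        constructor
        · rw [hsp, List.map_cons, pvTf_cons, pvJoin_cons_head, ih.2 p ps hps]
          simp [pvG, hc]
        · intro q qs hq
          rw [hsp] at hq
          injection hq with h1 h2
          subst h1; subst h2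
          rw [show PySem.Chars.lower (c :: p)
              = PySem.Chars.lowerChar c :: PySem.Chars.lower p from rfl]
          rw [pvJoin_cons_head, ih.2 p ps hps]
          simp [pvG, hc]

-- ===== VERDICT (by name: the statement is the Claim_ definition above) =====
theorem titlecase_hyphenated_spec : Claim_equal_titlecase_hyphenated := by
  intro token _
  unfold Spec_titlecase_hyphenated titlecase_hyphenated titlecase_hyphenated_alt
  rw [pvLoopB_eq]
  by_cases h : token = ""
  · subst h; decide
  · rw [if_neg h, pvSplitOn_eq, (pvMain token.toList).1]
    simp
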